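-- pv_equiv track=rewrite | github.com/waegaein/boj | pass/9020/run.py | get_partitions
-- ===== SOURCE A (Python) =====
-- def get_partitions(number, primes, sieve):
--     partitions = list()
--     prime_idx = 0
--     prime = primes[prime_idx]
--
--     while prime <= number // 2:
--         partner = number - prime
--         if sieve[partner]:
--             partitions.append((prime, partner))
--
--         prime_idx += 1
--         prime = primes[prime_idx]
--
--     return partitions
-- ===== SOURCE B (Python) =====
-- def get_partitions(number, primes, sieve):
--     half = number // 2
--     return [(i, number - i) for i in range(2, half + 1)
--             if sieve[i] and sieve[number - i]]
-- ===== Notes on version B (the rewrite author's own statement) =====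
-- stated objective: idiomatic
-- what changed: B drops the prime-list walk entirely: it scans the integers 2..number//2 and uses the sieve as the primality test for both pair members, instead of A's index-walk over the primes list testing only the partner.
-- outside the precondition, e.g. on get_partitions(0, [-1, 123], [False, True, False]): A returns [(-1, 1)], B returns []
import Mathlib
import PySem

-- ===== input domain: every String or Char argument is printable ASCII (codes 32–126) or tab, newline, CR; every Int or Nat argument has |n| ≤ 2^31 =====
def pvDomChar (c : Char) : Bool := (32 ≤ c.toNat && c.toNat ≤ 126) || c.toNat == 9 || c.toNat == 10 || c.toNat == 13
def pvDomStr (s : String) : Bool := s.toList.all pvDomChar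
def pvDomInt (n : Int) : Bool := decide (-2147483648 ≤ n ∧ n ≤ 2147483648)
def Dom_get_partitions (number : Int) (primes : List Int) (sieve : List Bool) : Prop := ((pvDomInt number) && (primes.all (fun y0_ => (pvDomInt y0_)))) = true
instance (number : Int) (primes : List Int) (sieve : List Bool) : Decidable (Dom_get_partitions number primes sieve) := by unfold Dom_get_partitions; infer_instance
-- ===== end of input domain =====

-- B replaces A's index-walk over the primes list by an idiomatic comprehension over 2..number//2
-- using the sieve as the primality test for both pair members (objective: idiomatic; not faster).

-- ===== PORT A =====
-- the while loop of A, as structural recursion over the not-yet-visited suffix of primes;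
-- where Python would raise IndexError (primes exhausted, sieve index out of range) the
-- recursion stops with the partitions built so far — those inputs are outside Pre_ below.
def pvLoopA (number : Int) (sieve : List Bool) : List Int → List (Int × Int) → List (Int × Int)
  | [], acc => acc
  | p :: rest, acc =>
    if p ≤ PySem.Int.floordiv number 2 then
      match PySem.List.pyGet? sieve (number - p) with
      | none => acc
      | some b => pvLoopA number sieve rest (if b then acc ++ [(p, number - p)] else acc)
    else acc

def get_partitions (number : Int) (primes : List Int) (sieve : List Bool) : List (Int × Int) :=
  pvLoopA number sieve primes []

-- ===== PORT B =====
def get_partitions_alt (number : Int) (primes : List Int) (sieve : List Bool) : List (Int × Int) :=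
  let half := PySem.Int.floordiv number 2
  ((PySem.List.pyRange 2 (half + 1) 1).filter
      (fun i => (PySem.List.pyGet? sieve i).getD false
                && (PySem.List.pyGet? sieve (number - i)).getD false)).map
    (fun i => (i, number - i))

-- ===== PRECONDITION & SPEC =====
-- Pre_ restricts to the function's natural Goldbach domain, where A returns and agrees with B:
-- primes must contain a sentinel beyond number//2 (otherwise A raises IndexError), the members
-- of primes up to number//2 must be exactly the sieve-true indices in [2, number//2] (the
-- caller's sieve/primes consistency; on inconsistent pairs the two readings legitimately
-- diverge), and sieve must reach index number-2 (otherwise A or B raises IndexError).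
def Pre_get_partitions (number : Int) (primes : List Int) (sieve : List Bool) : Prop :=
  (primes.takeWhile (fun p => decide (p ≤ PySem.Int.floordiv number 2))).length < primes.length ∧
  primes.takeWhile (fun p => decide (p ≤ PySem.Int.floordiv number 2)) =
    (PySem.List.pyRange 2 (PySem.Int.floordiv number 2 + 1) 1).filter
      (fun i => (PySem.List.pyGet? sieve i).getD false) ∧
  (number ≤ 3 ∨ number - 2 < (sieve.length : Int))
instance (number : Int) (primes : List Int) (sieve : List Bool) : Decidable (Pre_get_partitions number primes sieve) := by unfold Pre_get_partitions; infer_instance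

def pvWitness_get_partitions : Int × List Int × List Bool :=
  (4, [2, 3], [false, false, true, false, false])

def Spec_get_partitions (number : Int) (primes : List Int) (sieve : List Bool) (out : List (Int × Int)) : Prop := out = get_partitions_alt number primes sieve
instance (number : Int) (primes : List Int) (sieve : List Bool) (out : List (Int × Int)) : Decidable (Spec_get_partitions number primes sieve out) := by unfold Spec_get_partitions; infer_instance

-- ===== CLAIM (what is proved, stated in full; the proofs are below) =====
def Claim_equal_get_partitions : Prop := ∀ (number : Int) (primes : List Int) (sieve : List Bool), Dom_get_partitions number primes sieve → Pre_get_partitions number primes sieve → Spec_get_partitions number primes sieve (get_partitions number primes sieve)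

-- ===== LEMMAS AND PROOFS =====

-- A's loop appends, along the ≤ number//2 prefix of primes, the pairs whose partner the sieve marks.
theorem pvLoopA_eq (number : Int) (sieve : List Bool) :
    ∀ (l : List Int) (acc : List (Int × Int)),
      (∀ p ∈ l.takeWhile (fun p => decide (p ≤ PySem.Int.floordiv number 2)),
          (PySem.List.pyGet? sieve (number - p)).isSome) →
      (l.takeWhile (fun p => decide (p ≤ PySem.Int.floordiv number 2))).length < l.length →
      pvLoopA number sieve l acc =
        acc ++ (l.takeWhile (fun p => decide (p ≤ PySem.Int.floordiv number 2))).filterMap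
          (fun p => if (PySem.List.pyGet? sieve (number - p)).getD false
                    then some (p, number - p) else none) := by
  intro l
  induction l with
  | nil => intro acc _ hlen; simp at hlen
  | cons p rest ih =>
    intro acc hsome hlen
    by_cases hp : p ≤ PySem.Int.floordiv number 2
    · have htw : (p :: rest).takeWhile (fun p => decide (p ≤ PySem.Int.floordiv number 2)) =
          p :: rest.takeWhile (fun p => decide (p ≤ PySem.Int.floordiv number 2)) :=
        List.takeWhile_cons_of_pos (decide_eq_true hp)
      have hps : (PySem.List.pyGet? sieve (number - p)).isSome := by
        apply hsome; rw [htw]; exact List.mem_cons_self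
      obtain ⟨b, hb⟩ := Option.isSome_iff_exists.mp hps
      have hrec := ih (if b then acc ++ [(p, number - p)] else acc)
        (fun q hq => hsome q (by rw [htw]; exact List.mem_cons_of_mem _ hq))
        (by rw [htw] at hlen; simpa using Nat.lt_of_succ_lt_succ (by simpa using hlen))
      rw [htw]
      simp only [pvLoopA, if_pos hp, hb, hrec]
      cases b <;> simp [hb]
    · have htw : (p :: rest).takeWhile (fun p => decide (p ≤ PySem.Int.floordiv number 2)) =
          ([] : List Int) :=
        List.takeWhile_cons_of_neg (by simpa using hp)
      rw [htw]
      simp only [pvLoopA, List.filterMap_nil, List.append_nil]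
      rw [if_neg hp]

-- filtering then conditionally mapping = filtering by the conjunction then mapping
theorem pvFilterMap_filter {α : Type} (p1 p2 : Int → Bool) (f : Int → α) :
    ∀ l : List Int,
      (l.filter p1).filterMap (fun i => if p2 i then some (f i) else none) =
        (l.filter (fun i => p1 i && p2 i)).map f := by
  intro l
  induction l with
  | nil => simp
  | cons x xs ih =>
    by_cases h1 : p1 x
    · by_cases h2 : p2 x <;> simp [h1, h2, ih]
    · simp [h1, ih]

-- ===== VERDICT (by name: the statement is the Claim_ definition above) =====
theorem get_partitions_spec : Claim_equal_get_partitions := by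
  intro number primes sieve _ hpre
  obtain ⟨hlen, hpref, hsz⟩ := hpre
  have hfd : PySem.Int.floordiv number 2 = number / 2 :=
    PySem.Int.floordiv_eq_ediv_of_pos (by omega)
  -- every processed prime's partner is a valid nonnegative sieve index
  have hsome : ∀ p ∈ primes.takeWhile (fun p => decide (p ≤ PySem.Int.floordiv number 2)),
      (PySem.List.pyGet? sieve (number - p)).isSome := by
    intro p hp
    rw [hpref] at hp
    have hpm : p ∈ PySem.List.pyRange 2 (PySem.Int.floordiv number 2 + 1) 1 :=
      List.mem_of_mem_filter hp
    rw [PySem.List.mem_pyRange_one] at hpm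
    obtain ⟨hp2, hpm⟩ := hpm
    rw [hfd] at hpm
    rw [Option.isSome_iff_ne_none]
    intro hnone
    rw [PySem.List.pyGet?_eq_none_iff] at hnone
    simp [PySem.Raise.InRange] at hnone
    omega
  unfold Spec_get_partitions get_partitions get_partitions_alt
  rw [pvLoopA_eq number sieve primes [] hsome hlen, hpref]
  simp only [List.nil_append]
  exact pvFilterMap_filter _ _ _ _
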